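-- pv_equiv track=rewrite | github.com/RenanOliveira43/MC102 | lab06/lab06.py | correlacao_cruzada
-- ===== SOURCE A (Python) =====
-- def correlacao_cruzada(v1: list[int], m: list[int]) -> list[int]:
--     for i in range(len(v1) - len(m) + 1):
--         soma = 0
--         for j in range(len(m)):
--             soma += v1[i+j] * m[j]
--         v1[i] = soma
--     del v1[len(v1) - len(m) + 1:]
--     return v1
-- ===== SOURCE B (Python) =====
-- def correlacao_cruzada(v1: list[int], m: list[int]) -> list[int]:
--     # Equivalence is about the return value; like A, this mutates v1 in place
--     # (overwrites the leading positions and truncates with the same del line).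
--     t = len(v1) - len(m) + 1
--     if t > 0:
--         res = [0] * t
--         for j in range(len(m)):
--             mj = m[j]
--             for i in range(t):
--                 res[i] += v1[i + j] * mj
--         for i in range(t):
--             v1[i] = res[i]
--     del v1[t:]
--     return v1
-- ===== Notes on version B (the rewrite author's own statement) =====
-- stated objective: alternative
-- what changed: Replaces A's per-window full dot products (outer loop over output positions, inner over the kernel) by an interchanged scatter/convolution form: the kernel index is the outer loop and a running partial-sum vector res is accumulated across all output positions, then written back and truncated with the same del line; Pre_ excludes only m = [], where both A and B raise IndexError.
import Mathlib
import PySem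

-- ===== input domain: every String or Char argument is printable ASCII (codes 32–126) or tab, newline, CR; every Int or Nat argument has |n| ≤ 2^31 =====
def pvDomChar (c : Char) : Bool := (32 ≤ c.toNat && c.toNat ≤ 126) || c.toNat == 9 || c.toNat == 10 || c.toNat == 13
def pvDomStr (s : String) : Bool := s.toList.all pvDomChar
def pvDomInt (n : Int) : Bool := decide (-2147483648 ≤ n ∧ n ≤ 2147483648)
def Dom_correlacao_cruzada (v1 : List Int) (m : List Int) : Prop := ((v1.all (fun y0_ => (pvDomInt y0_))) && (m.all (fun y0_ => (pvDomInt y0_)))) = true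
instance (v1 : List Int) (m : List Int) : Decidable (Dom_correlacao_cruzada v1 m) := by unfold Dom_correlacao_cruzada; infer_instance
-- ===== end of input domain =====

-- B replaces A's per-window dot products by an interchanged scatter loop over kernel
-- positions accumulating a partial-sum vector (same cost; like A it mutates v1 in
-- place in Python — the equivalence proved here is about the return value).


-- ===== PORT A =====
-- del v1[len(v1) - len(m) + 1:]  (keeps the prefix, Python slice semantics)
def pvDelFrom (m v : List Int) : List Int :=
  PySem.List.slice v none (some ((v.length : Int) - (m.length : Int) + 1))

-- for i in range(len(v1)-len(m)+1): soma = 0; for j in range(len(m)): soma += v1[i+j]*m[j]; v1[i] = soma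
def correlacao_cruzada (v1 : List Int) (m : List Int) : List Int :=
  pvDelFrom m
    ((PySem.List.pyRange 0 ((v1.length : Int) - (m.length : Int) + 1) 1).foldl
      (fun v i => PySem.List.pySetD v i
        ((PySem.List.pyRange 0 (m.length : Int) 1).foldl
          (fun soma j => soma + PySem.List.pyGetD v (i + j) 0 * PySem.List.pyGetD m j 0) 0))
      v1)

-- ===== PORT B =====
-- res = [0]*t; for j in range(len(m)): for i in range(t): res[i] += v1[i+j]*m[j]
def pvScatterB (v1 m : List Int) (t : Int) : List Int :=
  (PySem.List.pyRange 0 (m.length : Int) 1).foldl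
    (fun res j =>
      (PySem.List.pyRange 0 t 1).foldl
        (fun res i => PySem.List.pySetD res i
          (PySem.List.pyGetD res i 0 + PySem.List.pyGetD v1 (i + j) 0 * PySem.List.pyGetD m j 0))
        res)
    (List.replicate t.toNat (0 : Int))

-- if t > 0: (scatter, then: for i in range(t): v1[i] = res[i]); del v1[t:]
def correlacao_cruzada_alt (v1 : List Int) (m : List Int) : List Int :=
  PySem.List.slice
    (if 0 < (v1.length : Int) - (m.length : Int) + 1 then
      (PySem.List.pyRange 0 ((v1.length : Int) - (m.length : Int) + 1) 1).foldl
        (fun v i => PySem.List.pySetD v i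
          (PySem.List.pyGetD (pvScatterB v1 m ((v1.length : Int) - (m.length : Int) + 1)) i 0))
        v1
     else v1)
    none (some ((v1.length : Int) - (m.length : Int) + 1))

-- ===== PRECONDITION & SPEC =====
-- Pre_ excludes only m = [], where the Python A raises IndexError (v1[len(v1)] = 0); B raises there too.
def Pre_correlacao_cruzada (v1 : List Int) (m : List Int) : Prop := m ≠ []
instance (v1 : List Int) (m : List Int) : Decidable (Pre_correlacao_cruzada v1 m) := by unfold Pre_correlacao_cruzada; infer_instance
def pvWitness_correlacao_cruzada : List Int × List Int := ([1, 2, 3, 4], [1, -1])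

def Spec_correlacao_cruzada (v1 : List Int) (m : List Int) (out : List Int) : Prop := out = correlacao_cruzada_alt v1 m
instance (v1 : List Int) (m : List Int) (out : List Int) : Decidable (Spec_correlacao_cruzada v1 m out) := by unfold Spec_correlacao_cruzada; infer_instance

-- ===== CLAIM (what is proved, stated in full; the proofs are below) =====
def Claim_equal_correlacao_cruzada : Prop := ∀ (v1 : List Int) (m : List Int), Dom_correlacao_cruzada v1 m → Pre_correlacao_cruzada v1 m → Spec_correlacao_cruzada v1 m (correlacao_cruzada v1 m)

-- ===== LEMMAS AND PROOFS =====

-- the exact cross-correlation value at output position i, read from list v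
def pvDot (v m : List Int) (i : Nat) : Int :=
  ((List.range m.length).map (fun j => v.getD (i + j) 0 * m.getD j 0)).sum

lemma pvGetD_set_ne (v : List Int) (i p : Nat) (a d : Int) (h : i ≠ p) :
    (v.set i a).getD p d = v.getD p d := by
  simp [List.getD_eq_getElem?_getD, List.getElem?_set_ne h]

lemma pvGetD_set_self (v : List Int) (i : Nat) (a d : Int) (h : i < v.length) :
    (v.set i a).getD i d = a := by
  simp [List.getD_eq_getElem?_getD, List.getElem?_set_self h]

/-- A left-to-right loop writing position `i` with a value that only depends on the
state's suffix from `i` on: its result, described pointwise against a reference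
list `r` the initial state agrees with from `s` on. -/
lemma pvSetLoop (g : List Int → Nat → Int)
    (hg : ∀ v w i, (∀ p, i ≤ p → v.getD p 0 = w.getD p 0) → g v i = g w i) :
    ∀ (c s : Nat) (v r : List Int), v.length = r.length →
      (∀ p, s ≤ p → v.getD p 0 = r.getD p 0) →
      s + c ≤ r.length →
      ((List.range' s c).foldl (fun v i => v.set i (g v i)) v).length = r.length ∧
      (∀ p, p < s → ((List.range' s c).foldl (fun v i => v.set i (g v i)) v).getD p 0 = v.getD p 0) ∧
      (∀ p, s ≤ p → p < s + c → ((List.range' s c).foldl (fun v i => v.set i (g v i)) v).getD p 0 = g r p) ∧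
      (∀ p, s + c ≤ p → ((List.range' s c).foldl (fun v i => v.set i (g v i)) v).getD p 0 = r.getD p 0) := by
  intro c
  induction c with
  | zero =>
    intro s v r hlen hagree _
    refine ⟨by simpa using hlen, by simp, fun p _ h2 => absurd h2 (by omega), by simpa using hagree⟩
  | succ c ih =>
    intro s v r hlen hagree hbound
    have hrange : List.range' s (c + 1) = s :: List.range' (s + 1) c := by
      simp [List.range'_succ]
    have hslt : s < v.length := by omega
    have hgs : g v s = g r s := hg v r s (fun p hp => hagree p hp)
    set v' := v.set s (g v s) with hv'
    have hlen' : v'.length = r.length := by simp [hv', hlen]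
    have hagree' : ∀ p, s + 1 ≤ p → v'.getD p 0 = r.getD p 0 := by
      intro p hp
      rw [hv', pvGetD_set_ne v s p _ _ (by omega)]
      exact hagree p (by omega)
    obtain ⟨ihlen, ihlo, ihmid, ihhi⟩ := ih (s + 1) v' r hlen' hagree' (by omega)
    rw [hrange]
    simp only [List.foldl_cons]
    refine ⟨ihlen, ?_, ?_, ?_⟩
    · intro p hp
      rw [ihlo p (by omega), hv', pvGetD_set_ne v s p _ _ (by omega)]
    · intro p hps hpc
      rcases Nat.eq_or_lt_of_le hps with h | h
      · subst h
        rw [ihlo s (by omega), hv', pvGetD_set_self v s _ _ hslt, hgs]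
      · exact ihmid p h (by omega)
    · intro p hp
      exact ihhi p (by omega)

lemma pvMapRangeGetD (f : Nat → Int) (T p : Nat) (hp : p < T) :
    ((List.range T).map f).getD p 0 = f p := by
  rw [List.getD_eq_getElem?_getD]
  simp [hp]

-- A's outer-loop step, with Nat-cast index, is `set i (pvDot v m i)`
lemma pvStepA (m v : List Int) (i : Nat) :
    PySem.List.pySetD v (i : Int)
      ((PySem.List.pyRange 0 (m.length : Int) 1).foldl
        (fun soma j => soma + PySem.List.pyGetD v ((i : Int) + j) 0 * PySem.List.pyGetD m j 0) 0)
    = v.set i (pvDot v m i) := by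
  rw [PySem.List.pyRange_zero_natCast, List.foldl_map, pvDot]
  have : ∀ (a : Int) (j : Nat),
      a + PySem.List.pyGetD v ((i : Int) + (j : Int)) 0 * PySem.List.pyGetD m (j : Int) 0
      = a + v.getD (i + j) 0 * m.getD j 0 := by
    intro a j
    rw [← Nat.cast_add, PySem.List.pyGetD_natCast, PySem.List.pyGetD_natCast]
  simp only [this]
  rw [PySem.List.foldl_add (g := fun j => v.getD (i + j) 0 * m.getD j 0), zero_add,
    PySem.List.pySetD_natCast]

lemma pvDot_congr (m v w : List Int) (i : Nat)
    (h : ∀ p, i ≤ p → v.getD p 0 = w.getD p 0) : pvDot v m i = pvDot w m i := by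
  unfold pvDot
  refine congrArg List.sum (List.map_congr_left ?_)
  intro j _
  rw [h (i + j) (by omega)]

-- A equals the closed-form correlation list when the kernel fits
lemma pvA_eq (v1 m : List Int) (hm : m ≠ []) (hKn : m.length ≤ v1.length) :
    correlacao_cruzada v1 m
      = (List.range (v1.length - m.length + 1)).map (pvDot v1 m) := by
  unfold correlacao_cruzada pvDelFrom
  have hK1 : 1 ≤ m.length := List.length_pos_iff.mpr hm
  set n := v1.length with hn
  set K := m.length with hK
  set T := n - K + 1 with hT
  have htInt : (n : Int) - (K : Int) + 1 = (T : Int) := by omega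
  rw [htInt, PySem.List.pyRange_zero_natCast T, List.foldl_map]
  have hstep : (fun (v : List Int) (k : Nat) =>
      PySem.List.pySetD v (k : Int)
        ((PySem.List.pyRange 0 (K : Int) 1).foldl
          (fun soma j => soma + PySem.List.pyGetD v ((k : Int) + j) 0 * PySem.List.pyGetD m j 0) 0))
      = fun (v : List Int) (k : Nat) => v.set k (pvDot v m k) := by
    funext v k
    exact pvStepA m v k
  rw [hstep]
  rw [List.range_eq_range']
  obtain ⟨hlen, -, hmid, -⟩ :=
    pvSetLoop (fun v i => pvDot v m i) (fun v w i h => pvDot_congr m v w i h)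
      T 0 v1 v1 rfl (fun _ _ => rfl) (by omega)
  set w := (List.range' 0 T).foldl (fun v i => v.set i (pvDot v m i)) v1 with hw
  have hwlen : (w.length : Int) - (K : Int) + 1 = (T : Int) := by
    rw [hlen]; omega
  rw [hwlen, PySem.List.slice_to_natCast]
  refine List.ext_getElem ?_ ?_
  · simp [hlen]; omega
  · intro p hp hp'
    have hp2 : p < T ∧ p < w.length := by simpa using hp
    rw [List.getElem_take, List.getElem_map, List.getElem_range', Nat.zero_add, one_mul]
    have := hmid p (by omega) (by omega)
    rw [← List.getD_eq_getElem w 0 hp2.2, this]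

-- partial correlation after the first J kernel positions have been scattered
def pvPartial (v1 m : List Int) (J i : Nat) : Int :=
  ((List.range J).map (fun j => v1.getD (i + j) 0 * m.getD j 0)).sum

-- B's inner scatter loop adds v1[i+J]*m[J] to every cell of the partial-sum vector
lemma pvInnerB (v1 m : List Int) (T J : Nat)
    (res : List Int) (hres : res = (List.range T).map (pvPartial v1 m J)) :
    (List.range' 0 T).foldl
      (fun r i => r.set i (r.getD i 0 + v1.getD (i + J) 0 * m.getD J 0)) res
    = (List.range T).map (pvPartial v1 m (J + 1)) := by
  have hlen : res.length = T := by simp [hres]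
  obtain ⟨hlen', -, hmid, -⟩ :=
    pvSetLoop (fun r i => r.getD i 0 + v1.getD (i + J) 0 * m.getD J 0)
      (fun v w i h => by simp only [h i (Nat.le_refl i)])
      T 0 res res rfl (fun _ _ => rfl) (by omega)
  set w := (List.range' 0 T).foldl
      (fun r i => r.set i (r.getD i 0 + v1.getD (i + J) 0 * m.getD J 0)) res with hw
  refine List.ext_getElem (by simp [hlen', hlen]) ?_
  intro p hp hp'
  have hpT : p < T := by
    have := hp
    rw [hlen'] at this
    omega
  rw [List.getElem_map, List.getElem_range]
  rw [← List.getD_eq_getElem w 0 hp, hmid p (by omega) (by omega), hres,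
    pvMapRangeGetD _ _ _ hpT]
  rw [pvPartial, pvPartial, List.range_succ, List.map_append, List.sum_append]
  simp

-- B's outer loop over kernel positions J, J+1, …, J+c-1
lemma pvOuterB (v1 m : List Int) (T : Nat) :
    ∀ (c J : Nat) (res : List Int), res = (List.range T).map (pvPartial v1 m J) →
      (List.range' J c).foldl
        (fun res j => (List.range' 0 T).foldl
          (fun r i => r.set i (r.getD i 0 + v1.getD (i + j) 0 * m.getD j 0)) res) res
      = (List.range T).map (pvPartial v1 m (J + c)) := by
  intro c
  induction c with
  | zero => intro J res hres; simpa using hres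
  | succ c ih =>
    intro J res hres
    rw [List.range'_succ, List.foldl_cons]
    have h1 := pvInnerB v1 m T J res hres
    rw [ih (J + 1) _ h1, show J + 1 + c = J + (c + 1) from by omega]

-- B equals the same closed-form correlation list when the kernel fits
lemma pvB_eq (v1 m : List Int) (hm : m ≠ []) (hKn : m.length ≤ v1.length) :
    correlacao_cruzada_alt v1 m
      = (List.range (v1.length - m.length + 1)).map (pvDot v1 m) := by
  unfold correlacao_cruzada_alt
  have hK1 : 1 ≤ m.length := List.length_pos_iff.mpr hm
  set n := v1.length with hn
  set K := m.length with hK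
  set T := n - K + 1 with hT
  have htInt : (n : Int) - (K : Int) + 1 = (T : Int) := by omega
  rw [htInt]
  have hpos : (0 : Int) < (T : Int) := by omega
  rw [if_pos hpos]
  -- the scatter double loop computes the partial-sum vector for all K kernel positions
  have hscat : pvScatterB v1 m (T : Int) = (List.range T).map (pvPartial v1 m K) := by
    unfold pvScatterB
    rw [PySem.List.pyRange_zero_natCast m.length, List.foldl_map]
    have hres0 : List.replicate ((T : Int)).toNat (0 : Int)
        = (List.range T).map (pvPartial v1 m 0) := by
      refine List.ext_getElem (by simp) ?_
      intro p hp hp'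
      simp [pvPartial]
    rw [hres0]
    have hinner : ∀ (res : List Int) (j : Nat),
        (PySem.List.pyRange 0 (T : Int) 1).foldl
          (fun res i => PySem.List.pySetD res i
            (PySem.List.pyGetD res i 0 + PySem.List.pyGetD v1 (i + (j : Int)) 0 * PySem.List.pyGetD m (j : Int) 0)) res
        = (List.range' 0 T).foldl
            (fun r i => r.set i (r.getD i 0 + v1.getD (i + j) 0 * m.getD j 0)) res := by
      intro res j
      rw [PySem.List.pyRange_zero_natCast T, List.foldl_map, List.range_eq_range']
      refine PySem.List.foldl_congr_mem _ _ _ _ ?_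
      intro r i _
      rw [← Nat.cast_add, PySem.List.pyGetD_natCast, PySem.List.pyGetD_natCast,
        PySem.List.pyGetD_natCast, PySem.List.pySetD_natCast]
    simp only [hinner]
    rw [show List.range m.length = List.range' 0 K from List.range_eq_range' ..]
    simpa using pvOuterB v1 m T K 0 ((List.range T).map (pvPartial v1 m 0)) rfl
  rw [hscat]
  -- the write-back loop copies the finished vector into the first T cells of v1
  have hwb : (PySem.List.pyRange 0 (T : Int) 1).foldl
      (fun v i => PySem.List.pySetD v i
        (PySem.List.pyGetD ((List.range T).map (pvPartial v1 m K)) i 0)) v1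
      = (List.range' 0 T).foldl
          (fun v i => v.set i (((List.range T).map (pvPartial v1 m K)).getD i 0)) v1 := by
    rw [PySem.List.pyRange_zero_natCast T, List.foldl_map, List.range_eq_range']
    refine PySem.List.foldl_congr_mem _ _ _ _ ?_
    intro v i _
    rw [PySem.List.pyGetD_natCast, PySem.List.pySetD_natCast]
  rw [hwb]
  obtain ⟨hlen, -, hmid, -⟩ :=
    pvSetLoop (fun _ i => ((List.range T).map (pvPartial v1 m K)).getD i 0)
      (fun _ _ _ _ => rfl)
      T 0 v1 v1 rfl (fun _ _ => rfl) (by omega)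
  set w := (List.range' 0 T).foldl
      (fun v i => v.set i (((List.range T).map (pvPartial v1 m K)).getD i 0)) v1 with hw
  rw [PySem.List.slice_to_natCast]
  refine List.ext_getElem ?_ ?_
  · simp [hlen]; omega
  · intro p hp hp'
    have hp2 : p < T ∧ p < w.length := by simpa using hp
    rw [List.getElem_take, List.getElem_map, List.getElem_range]
    rw [← List.getD_eq_getElem w 0 hp2.2, hmid p (by omega) (by omega),
      pvMapRangeGetD _ _ _ hp2.1]
    rfl

-- ===== VERDICT (by name: the statement is the Claim_ definition above) =====
theorem correlacao_cruzada_spec : Claim_equal_correlacao_cruzada := by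
  intro v1 m _ hm
  unfold Spec_correlacao_cruzada
  by_cases hKn : m.length ≤ v1.length
  · rw [pvA_eq v1 m hm hKn, pvB_eq v1 m hm hKn]
  · -- kernel longer than the vector: both loops run zero times, both just truncate v1
    unfold correlacao_cruzada correlacao_cruzada_alt pvDelFrom
    have ht : (v1.length : Int) - (m.length : Int) + 1 ≤ 0 := by omega
    rw [PySem.List.pyRange_one_eq_nil ht, if_neg (by omega)]
    simp
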